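-- pv_equiv track=rewrite | github.com/seogudwns/BOJ-Programmers | 프로그래머스/lv2/42626. 더 맵게/더 맵게.py | solution
-- ===== SOURCE A (Python) =====
-- import heapq
--
-- def solution(scoville, K):
--     answer = 0
--     heapq.heapify(scoville)
--     while scoville[0]<K:
--         if len(scoville)<2:
--             return -1
--         heapq.heappush(scoville, heapq.heappop(scoville)+ 2*heapq.heappop(scoville))
--         answer+=1
--     return answer
-- ===== SOURCE B (Python) =====
-- def _insert_sorted(arr, x):
--     # insert x into ascending arr, keeping it sorted (before the first element not < x)
--     i = 0
--     while i < len(arr) and arr[i] < x: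
--         i += 1
--     arr.insert(i, x)
--
--
-- def solution(scoville, K):
--     arr = sorted(scoville)
--     answer = 0
--     while arr[0] < K:
--         if len(arr) < 2:
--             return -1
--         a = arr.pop(0)
--         b = arr.pop(0)
--         _insert_sorted(arr, a + 2 * b)
--         answer += 1
--     return answer
-- ===== Notes on version B (the rewrite author's own statement) =====
-- stated objective: alternative
-- what changed: Replaces the binary heap with a maintained ascending sorted list: sort once, pop the two smallest off the front, and reinsert a+2*b by linear sorted insertion.
import Mathlib
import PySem

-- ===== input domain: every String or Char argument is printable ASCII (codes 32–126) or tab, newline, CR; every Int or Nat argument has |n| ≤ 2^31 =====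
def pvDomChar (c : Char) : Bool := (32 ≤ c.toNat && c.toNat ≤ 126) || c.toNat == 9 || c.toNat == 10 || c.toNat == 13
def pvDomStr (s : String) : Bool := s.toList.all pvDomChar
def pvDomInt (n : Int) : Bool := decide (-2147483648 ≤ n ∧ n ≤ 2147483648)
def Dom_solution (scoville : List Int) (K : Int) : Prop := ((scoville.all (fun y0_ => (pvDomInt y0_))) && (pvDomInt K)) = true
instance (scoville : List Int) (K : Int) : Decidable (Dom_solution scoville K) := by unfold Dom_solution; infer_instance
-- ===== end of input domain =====

-- B replaces A's binary heap by a once-sorted list maintained by linear sorted insertion (objective: alternative).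
-- A mutates its argument in place (heapify/heappop/heappush); B sorts a copy. The claim is about the RETURN value only.

-- ===== PORT A =====
-- A calls the standard-library module heapq. Its calls are ported as a functional (skew) binary
-- min-heap: for Int elements the value popped by heappop is always a minimum of the heap's
-- multiset and push/pop preserve that multiset, so heapq's observable value behaviour (the only
-- thing A's return value depends on) is exact; only the internal node arrangement differs.
inductive PyHeap where
  | nil : PyHeap
  | node : Int → PyHeap → PyHeap → PyHeap
deriving DecidableEq, Repr

def PyHeap.size : PyHeap → Nat
  | .nil => 0
  | .node _ l r => 1 + l.size + r.size

def PyHeap.merge : PyHeap → PyHeap → PyHeap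
  | .nil, h => h
  | h, .nil => h
  | .node x l1 r1, .node y l2 r2 =>
    if x ≤ y then .node x (PyHeap.merge r1 (.node y l2 r2)) l1
    else .node y (PyHeap.merge (.node x l1 r1) r2) l2
termination_by h1 h2 => h1.size + h2.size
decreasing_by all_goals simp [PyHeap.size]; try omega

-- heapq.heappush
def PyHeap.push (v : Int) (h : PyHeap) : PyHeap := PyHeap.merge (.node v .nil .nil) h

-- heapq.heapify (element-by-element insertion: same multiset, hence same popped values, as CPython's sift-based build)
def PyHeap.heapify (l : List Int) : PyHeap := l.foldl (fun h v => PyHeap.push v h) .nil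

-- the while loop of A; fuel = len(scoville)+1 bounds the iteration count (each iteration shrinks the heap by one)
def loopA (K : Int) : Nat → PyHeap → Int → Int
  | 0, _, ans => ans                       -- fuel exhausted: unreachable (the loop runs < fuel times)
  | _ + 1, PyHeap.nil, ans => ans          -- scoville[0] raises IndexError in Python: outside Pre_
  | n + 1, PyHeap.node v hl hr, ans =>
    if v < K then
      -- heappop yields the root v; the remaining heap is merge hl hr
      match PyHeap.merge hl hr with
      | PyHeap.nil => -1                   -- len(scoville) < 2 (merged children empty ⟺ the heap was a single node)
      | PyHeap.node w l2 r2 =>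
        -- second heappop yields w; heappush of v + 2*w
        loopA K n (PyHeap.push (v + 2 * w) (PyHeap.merge l2 r2)) (ans + 1)
    else ans

def solution (scoville : List Int) (K : Int) : Int :=
  loopA K (scoville.length + 1) (PyHeap.heapify scoville) 0

-- ===== PORT B =====
-- _insert_sorted: linear scan past the elements < x, insert there — exactly List.orderedInsert (· ≤ ·)
-- the while loop of B on the maintained ascending list; same fuel bound
def loopB (K : Int) : Nat → List Int → Int → Int
  | 0, _, ans => ans                       -- fuel exhausted: unreachable
  | _ + 1, [], ans => ans                  -- arr[0] raises IndexError in Python: outside Pre_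
  | n + 1, a :: rest, ans =>
    if a < K then
      match rest with
      | [] => -1                           -- len(arr) < 2
      | b :: rest' =>
        loopB K n (List.orderedInsert (· ≤ ·) (a + 2 * b) rest') (ans + 1)
    else ans

def solution_alt (scoville : List Int) (K : Int) : Int :=
  loopB K (scoville.length + 1) (PySem.List.sorted scoville (fun x => x) false) 0

-- ===== PRECONDITION & SPEC =====
-- Pre_ excludes exactly the empty list, on which Python A raises IndexError at scoville[0].
def Pre_solution (scoville : List Int) (K : Int) : Prop := scoville ≠ []
instance (scoville : List Int) (K : Int) : Decidable (Pre_solution scoville K) := by unfold Pre_solution; infer_instance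
def pvWitness_solution : List Int × Int := ([1, 2, 9], 7)

def Spec_solution (scoville : List Int) (K : Int) (out : Int) : Prop := out = solution_alt scoville K
instance (scoville : List Int) (K : Int) (out : Int) : Decidable (Spec_solution scoville K out) := by unfold Spec_solution; infer_instance

-- ===== CLAIM (what is proved, stated in full; the proofs are below) =====
def Claim_equal_solution : Prop := ∀ (scoville : List Int) (K : Int), Dom_solution scoville K → Pre_solution scoville K → Spec_solution scoville K (solution scoville K)

-- ===== LEMMAS AND PROOFS =====

-- the multiset of elements of a heap
def PyHeap.ms : PyHeap → Multiset Int
  | .nil => 0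
  | .node v l r => v ::ₘ (l.ms + r.ms)

-- min-heap invariant: every root bounds its subtree
def PyHeap.WF : PyHeap → Prop
  | .nil => True
  | .node v l r => PyHeap.WF l ∧ PyHeap.WF r ∧ ∀ x ∈ l.ms + r.ms, v ≤ x

lemma ms_merge (a b : PyHeap) : (PyHeap.merge a b).ms = a.ms + b.ms := by
  fun_induction PyHeap.merge a b with
  | case1 h => simp [PyHeap.ms]
  | case2 h => simp [PyHeap.ms]
  | case3 x l1 r1 y l2 r2 hxy ih =>
    simp only [PyHeap.ms, ih, ← Multiset.singleton_add]
    abel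
  | case4 x l1 r1 y l2 r2 hxy ih =>
    simp only [PyHeap.ms, ih, ← Multiset.singleton_add]
    abel

lemma WF_min {v : Int} {l r : PyHeap} (h : PyHeap.WF (.node v l r)) :
    ∀ x ∈ (PyHeap.node v l r).ms, v ≤ x := by
  intro x hx
  simp only [PyHeap.ms, Multiset.mem_cons] at hx
  rcases hx with rfl | hx
  · exact le_refl x
  · exact h.2.2 x hx

lemma WF_merge {a b : PyHeap} (ha : PyHeap.WF a) (hb : PyHeap.WF b) : PyHeap.WF (PyHeap.merge a b) := by
  fun_induction PyHeap.merge a b with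
  | case1 h => exact hb
  | case2 h => exact ha
  | case3 x l1 r1 y l2 r2 hxy ih =>
    refine ⟨ih ha.2.1 hb, ha.1, ?_⟩
    intro z hz
    rw [ms_merge] at hz
    simp only [Multiset.mem_add] at hz
    rcases hz with (hz | hz) | hz
    · exact ha.2.2 z (Multiset.mem_add.mpr (Or.inr hz))
    · exact le_trans hxy (WF_min hb z hz)
    · exact ha.2.2 z (Multiset.mem_add.mpr (Or.inl hz))
  | case4 x l1 r1 y l2 r2 hxy ih =>
    refine ⟨ih ha hb.2.1, hb.1, ?_⟩
    intro z hz
    rw [ms_merge] at hz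
    simp only [Multiset.mem_add] at hz
    rcases hz with (hz | hz) | hz
    · exact le_trans (le_of_not_ge hxy) (WF_min ha z hz)
    · exact hb.2.2 z (Multiset.mem_add.mpr (Or.inr hz))
    · exact hb.2.2 z (Multiset.mem_add.mpr (Or.inl hz))

lemma WF_push (v : Int) {h : PyHeap} (hh : PyHeap.WF h) : PyHeap.WF (PyHeap.push v h) := by
  apply WF_merge _ hh
  refine ⟨trivial, trivial, ?_⟩
  intro x hx
  simp [PyHeap.ms] at hx

lemma ms_push (v : Int) (h : PyHeap) : (PyHeap.push v h).ms = v ::ₘ h.ms := by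
  simp [PyHeap.push, ms_merge, PyHeap.ms]

lemma WF_heapify (l : List Int) : PyHeap.WF (PyHeap.heapify l) := by
  suffices H : ∀ (l : List Int) (h : PyHeap), PyHeap.WF h → PyHeap.WF (l.foldl (fun h v => PyHeap.push v h) h) by
    exact H l .nil trivial
  intro l
  induction l with
  | nil => intro h hh; exact hh
  | cons x xs ih => intro h hh; exact ih _ (WF_push x hh)

lemma ms_heapify (l : List Int) : (PyHeap.heapify l).ms = ↑l := by
  suffices H : ∀ (l : List Int) (h : PyHeap), (l.foldl (fun h v => PyHeap.push v h) h).ms = h.ms + ↑l by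
    simpa [PyHeap.ms] using H l .nil
  intro l
  induction l with
  | nil => intro h; simp
  | cons x xs ih =>
    intro h
    simp only [List.foldl_cons, ih, ms_push, ← Multiset.cons_coe, ← Multiset.singleton_add]
    abel

lemma sorted_head_min {a : Int} {rest : List Int} (h : (a :: rest).Sorted (· ≤ ·)) :
    ∀ x ∈ (a :: rest), a ≤ x := by
  intro x hx
  rcases List.mem_cons.mp hx with rfl | hx
  · exact le_refl x
  · exact List.rel_of_sorted_cons h hx

lemma loop_eq (K : Int) : ∀ (n : Nat) (h : PyHeap) (l : List Int) (ans : Int),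
    PyHeap.WF h → l.Sorted (· ≤ ·) → h.ms = ↑l → loopA K n h ans = loopB K n l ans := by
  intro n
  induction n with
  | zero => intro h l ans _ _ _; rfl
  | succ n ih =>
    intro h l ans hwf hsort hms
    match h, l with
    | PyHeap.nil, l =>
      have : l = [] := by simpa [PyHeap.ms, Eq.comm, Multiset.coe_eq_zero] using hms
      subst this; rfl
    | PyHeap.node v hl hr, [] =>
      exfalso
      simp [PyHeap.ms] at hms
    | PyHeap.node v hl hr, a :: rest =>
      have hva : v = a := by
        have h1 : v ≤ a := WF_min hwf a (by rw [hms]; exact Multiset.mem_coe.mpr (by simp))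
        have h2 : a ≤ v := by
          have hv : v ∈ (a :: rest) := by
            have : v ∈ (PyHeap.node v hl hr).ms := by simp [PyHeap.ms]
            rw [hms] at this; exact Multiset.mem_coe.mp this
          exact sorted_head_min hsort v hv
        omega
      subst hva
      show (if v < K then _ else ans) = (if v < K then _ else ans)
      by_cases hvK : v < K
      · simp only [if_pos hvK]
        have hrest : (PyHeap.merge hl hr).ms = ↑rest := by
          have hc : v ::ₘ (PyHeap.merge hl hr).ms = v ::ₘ (↑rest : Multiset Int) := by
            rw [ms_merge, Multiset.cons_coe]
            simpa [PyHeap.ms] using hms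
          exact (Multiset.cons_inj_right _).mp hc
        have hwfm : PyHeap.WF (PyHeap.merge hl hr) := WF_merge hwf.1 hwf.2.1
        have hsrest : rest.Sorted (· ≤ ·) := hsort.of_cons
        match hm : PyHeap.merge hl hr, rest with
        | PyHeap.nil, [] => rfl
        | PyHeap.nil, b :: rest' =>
          exfalso; rw [hm] at hrest; simp [PyHeap.ms, Eq.comm, Multiset.coe_eq_zero] at hrest
        | PyHeap.node w l2 r2, [] =>
          exfalso; rw [hm] at hrest; simp [PyHeap.ms] at hrest
        | PyHeap.node w l2 r2, b :: rest' =>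
          rw [hm] at hrest hwfm
          have hwb : w = b := by
            have h1 : w ≤ b := WF_min hwfm b (by rw [hrest]; exact Multiset.mem_coe.mpr (by simp))
            have h2 : b ≤ w := by
              have hw : w ∈ (b :: rest') := by
                have : w ∈ (PyHeap.node w l2 r2).ms := by simp [PyHeap.ms]
                rw [hrest] at this; exact Multiset.mem_coe.mp this
              exact sorted_head_min hsrest w hw
            omega
          subst hwb
          apply ih
          · exact WF_push _ (WF_merge hwfm.1 hwfm.2.1)
          · exact List.Sorted.orderedInsert _ _ hsrest.of_cons
          · rw [ms_push, ms_merge]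
            have hrest' : l2.ms + r2.ms = ↑rest' := by
              have hc : w ::ₘ (l2.ms + r2.ms) = w ::ₘ (↑rest' : Multiset Int) := by
                rw [Multiset.cons_coe]
                simpa [PyHeap.ms] using hrest
              exact (Multiset.cons_inj_right _).mp hc
            rw [hrest', Multiset.cons_coe]
            exact (Multiset.coe_eq_coe.mpr (List.perm_orderedInsert _ _ _)).symm
      · simp only [if_neg hvK]

-- ===== VERDICT (by name: the statement is the Claim_ definition above) =====
theorem solution_spec : Claim_equal_solution := by
  intro scoville K _ _
  show solution scoville K = solution_alt scoville K
  unfold solution solution_alt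
  apply loop_eq
  · exact WF_heapify scoville
  · simpa using PySem.List.sorted_pairwise scoville (fun x => x)
  · rw [ms_heapify]
    exact (Multiset.coe_eq_coe.mpr (PySem.List.sorted_perm scoville (fun x => x) false)).symm
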